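-- pv_equiv track=rewrite | github.com/bsquiroz/learn_with_exercises | 03_bucles/05_twoWords/main.py | twoWords
-- ===== SOURCE A (Python) =====
-- def twoWords(phrase):
--     phrase = ''.join(phrase.split(' '))
--
--     wordEven = ''
--     wordOdd = ''
--
--     for i in range(0, len(phrase)):
--         if i % 2:
--             wordOdd += phrase[i]
--         else:
--            wordEven += phrase[i]
--
--     return f'{wordEven} y {wordOdd}'
-- ===== SOURCE B (Python) =====
-- def twoWords(phrase):
--     phrase = ''.join(phrase.split(' '))
--     return f'{phrase[0::2]} y {phrase[1::2]}'
-- ===== Notes on version B (the rewrite author's own statement) =====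
-- stated objective: faster
-- what changed: The per-index Python loop with a parity branch and two growing string accumulators is replaced by two stride slices phrase[0::2] and phrase[1::2]; the space-removing first line is kept.
import Mathlib
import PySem

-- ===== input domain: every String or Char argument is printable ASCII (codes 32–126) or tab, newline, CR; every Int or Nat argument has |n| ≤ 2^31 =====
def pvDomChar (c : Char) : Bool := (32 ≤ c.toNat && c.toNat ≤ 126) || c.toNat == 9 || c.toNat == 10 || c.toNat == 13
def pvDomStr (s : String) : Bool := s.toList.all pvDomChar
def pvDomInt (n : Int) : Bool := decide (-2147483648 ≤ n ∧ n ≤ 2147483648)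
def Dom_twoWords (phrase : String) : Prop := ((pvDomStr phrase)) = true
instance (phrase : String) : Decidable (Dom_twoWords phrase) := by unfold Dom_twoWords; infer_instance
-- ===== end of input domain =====

-- B replaces A's index loop with its parity branch by two stride slices p[0::2] / p[1::2] (more idiomatic); the space-removing first line is kept.

-- ===== PORT A =====
-- literal port of A: p = ''.join(phrase.split(' ')); loop over range(0, len(p)) splitting by index parity
def twoWords (phrase : String) : String :=
  let p : String := PySem.Str.join "" ((PySem.Str.split? phrase " ").getD [])
  let st := (PySem.List.pyRange 0 (PySem.Str.len p) 1).foldl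
    (fun (st : String × String) (i : Int) =>
      if PySem.Int.mod i 2 ≠ 0 then
        (st.1, st.2.push ((PySem.Str.pyGet? p i).getD ' '))   -- i is always in range; the getD default is never used
      else
        (st.1.push ((PySem.Str.pyGet? p i).getD ' '), st.2))
    ("", "")
  st.1 ++ " y " ++ st.2

-- ===== PORT B =====
-- literal port of Source B: same first line, then the slices p[0::2] and p[1::2]
def twoWords_alt (phrase : String) : String :=
  let p : String := PySem.Str.join "" ((PySem.Str.split? phrase " ").getD [])
  ((PySem.Str.slice? p (some 0) none 2).getD "") ++ " y " ++ ((PySem.Str.slice? p (some 1) none 2).getD "")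

-- ===== PRECONDITION & SPEC =====
def Spec_twoWords (phrase : String) (out : String) : Prop := out = twoWords_alt phrase
instance (phrase : String) (out : String) : Decidable (Spec_twoWords phrase out) := by unfold Spec_twoWords; infer_instance

-- ===== CLAIM (what is proved, stated in full; the proofs are below) =====
def Claim_equal_twoWords : Prop := ∀ (phrase : String), Dom_twoWords phrase → Spec_twoWords phrase (twoWords phrase)

-- ===== LEMMAS AND PROOFS =====

def pvEvens {α : Type} : List α → List α
  | [] => []
  | a :: l => a :: (match l with | [] => [] | _ :: l' => pvEvens l')
def pvOdds {α : Type} (l : List α) : List α := pvEvens l.tail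

lemma ev_od {α : Type} (xs : List α) :
    (List.range ((xs.length+1)/2)).filterMap (fun k => xs[2*k]?) = pvEvens xs
    ∧ (List.range (xs.length/2)).filterMap (fun k => xs[2*k+1]?) = pvOdds xs := by
  induction xs with
  | nil => simp [pvEvens, pvOdds]
  | cons a l ih =>
    constructor
    · have h1 : (l.length + 1 + 1)/2 = l.length/2 + 1 := by omega
      rw [List.length_cons, h1, List.range_succ_eq_map, List.filterMap_cons,
          List.filterMap_map]
      simp only [Nat.mul_zero, List.getElem?_cons_zero]
      have : (fun k => (a :: l)[2*k]?) ∘ Nat.succ = fun k => l[2*k+1]? := by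
        funext k
        have : 2 * Nat.succ k = (2*k+1) + 1 := by omega
        simp [this, Function.comp]
      rw [this, ih.2]
      simp [pvOdds]
      cases l <;> simp [pvEvens]
    · have h2 : (l.length + 1)/2 = (l.length+1)/2 := by omega
      rw [List.length_cons, h2]
      have : (fun k => (a :: l)[2*k+1]?) = fun k => l[2*k]? := by
        funext k; simp
      rw [this, ih.1]
      simp [pvOdds]

lemma slice_evens {α : Type} (xs : List α) :
    PySem.List.slice? xs (some 0) none 2 = some (pvEvens xs) := by
  have hcnt : (if 0 < xs.length then (((xs.length:Int) + 2 - 1)/2).toNat else 0)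
      = (xs.length + 1)/2 := by
    split_ifs with h
    · have h2 : ((xs.length:Int) + 2 - 1) = ((xs.length + 1 : Nat) : Int) := by push_cast; ring
      rw [h2, show ((2:Int)) = ((2:Nat):Int) from rfl, ← Int.natCast_ediv, Int.toNat_natCast]
    · omega
  have hidx : (fun x : Nat => xs[((2:Int) * ↑x).toNat]?) = fun x => xs[2*x]? := by
    funext x
    have h3 : ((2:Int) * (x:Int)).toNat = 2*x := by omega
    rw [h3]
  simp only [PySem.List.slice?, PySem.List.sliceIndices]
  norm_num [hcnt, hidx]
  exact (ev_od xs).1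

lemma slice_odds {α : Type} (xs : List α) :
    PySem.List.slice? xs (some 1) none 2 = some (pvOdds xs) := by
  cases xs with
  | nil => simp [PySem.List.slice?, PySem.List.sliceIndices, pvOdds, pvEvens]
  | cons a l =>
    have hmin : min (1:Int) ((a::l).length:Int) = 1 := by
      simp only [List.length_cons]
      omega
    have hcnt : (if 0 < l.length then (((l.length:Int) + 2 - 1)/2).toNat else 0)
        = (l.length + 1)/2 := by
      split_ifs with h
      · have h2 : ((l.length:Int) + 2 - 1) = ((l.length + 1 : Nat) : Int) := by push_cast; ring
        rw [h2, show ((2:Int)) = ((2:Nat):Int) from rfl, ← Int.natCast_ediv, Int.toNat_natCast]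
      · omega
    have hidx : (fun x : Nat => (a::l)[((1:Int) + 2 * ↑x).toNat]?) = fun x => (a::l)[2*x+1]? := by
      funext x
      have h3 : ((1:Int) + 2 * (x:Int)).toNat = 2*x+1 := by omega
      rw [h3]
    simp only [PySem.List.slice?, PySem.List.sliceIndices]
    norm_num [hmin, hcnt, hidx]
    exact (ev_od l).1

lemma pvEvens_cons {α : Type} (a : α) (l : List α) :
    pvEvens (a :: l) = a :: pvOdds l := by
  cases l <;> simp [pvEvens, pvOdds]

lemma push_append_ofList (s : String) (a : Char) (l : List Char) :
    s.push a ++ String.ofList l = s ++ String.ofList (a :: l) := by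
  rw [← String.toList_inj]
  simp

lemma loop_gen (p : String) : ∀ (rest : List Char) (k : Nat) (E O : String),
    p.toList.drop k = rest →
    (PySem.List.pyRange (k:Int) (PySem.Str.len p) 1).foldl
      (fun (st : String × String) (i : Int) =>
        if PySem.Int.mod i 2 ≠ 0 then
          (st.1, st.2.push ((PySem.Str.pyGet? p i).getD ' '))
        else
          (st.1.push ((PySem.Str.pyGet? p i).getD ' '), st.2)) (E, O)
    = if k % 2 = 0 then (E ++ String.ofList (pvEvens rest), O ++ String.ofList (pvOdds rest))
      else (E ++ String.ofList (pvOdds rest), O ++ String.ofList (pvEvens rest)) := by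
  intro rest
  induction rest with
  | nil =>
    intro k E O hdrop
    have hk : p.toList.length ≤ k := by
      by_contra hlt
      have := List.drop_eq_nil_iff.mp hdrop
      omega
    have hlen : p.toList.length = p.length := by simp
    have hrange : PySem.List.pyRange (k:Int) (PySem.Str.len p) 1 = [] := by
      simp [PySem.List.pyRange, PySem.Str.len]
      omega
    rw [hrange]
    simp [pvEvens, pvOdds]
  | cons a rest' ih =>
    intro k E O hdrop
    have hk : k < p.toList.length := by
      by_contra hge
      rw [List.drop_eq_nil_iff.mpr (by omega)] at hdrop
      exact absurd hdrop (by simp)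
    have hget : p.toList[k]? = some a := by
      have h0 : (p.toList.drop k)[0]? = some a := by rw [hdrop]; rfl
      rwa [List.getElem?_drop, Nat.add_zero] at h0
    have hdrop' : p.toList.drop (k+1) = rest' := by
      rw [← List.tail_drop, hdrop]
      rfl
    have hlen : p.toList.length = p.length := by simp
    have hlt : (k:Int) < PySem.Str.len p := by
      simp [PySem.Str.len]
      omega
    rw [PySem.List.pyRange_one_cons hlt, List.foldl_cons]
    have hmod : PySem.Int.mod (k:Int) 2 = ((k % 2 : Nat) : Int) := by
      simp [PySem.Int.mod, Int.fmod_eq_emod]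
    have hpg : PySem.Str.pyGet? p (k:Int) = some a := by
      simp [PySem.Str.pyGet?, PySem.List.pyGet?_natCast, hget]
    have hstep : ((k:Int) + 1) = (((k+1 : Nat)) : Int) := by push_cast; ring
    rcases Nat.mod_two_eq_zero_or_one k with hk2 | hk2
    · simp only [hmod, hk2, Nat.cast_zero, ne_eq, not_true_eq_false, if_false,
        not_false_eq_true, hpg, Option.getD_some]
      rw [hstep, ih (k+1) (E.push a) O hdrop']
      have : (k+1) % 2 = 1 := by omega
      simp [this, pvOdds, pvEvens_cons, ← push_append_ofList]
    · simp only [hmod, hk2, Nat.cast_one, ne_eq, one_ne_zero, not_false_eq_true,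
        if_true, hpg, Option.getD_some]
      rw [hstep, ih (k+1) E (O.push a) hdrop']
      have : (k+1) % 2 = 0 := by omega
      simp [this, pvOdds, pvEvens_cons, ← push_append_ofList]

lemma loop_evens_odds (p : String) :
    ((PySem.List.pyRange 0 (PySem.Str.len p) 1).foldl
      (fun (st : String × String) (i : Int) =>
        if PySem.Int.mod i 2 ≠ 0 then
          (st.1, st.2.push ((PySem.Str.pyGet? p i).getD ' '))
        else
          (st.1.push ((PySem.Str.pyGet? p i).getD ' '), st.2))
      ("", ""))
    = (String.ofList (pvEvens p.toList), String.ofList (pvOdds p.toList)) := by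
  have h := loop_gen p p.toList 0 "" "" (by simp)
  simp only [Nat.cast_zero, Nat.zero_mod, if_pos] at h
  rw [h]
  simp


-- ===== VERDICT (by name: the statement is the Claim_ definition above) =====
theorem twoWords_spec : Claim_equal_twoWords := by
  intro phrase _
  unfold Spec_twoWords twoWords twoWords_alt
  simp only [loop_evens_odds, PySem.Str.slice?, PySem.Chars.slice?_eq_listSlice?,
    slice_evens, slice_odds, Option.map_some, Option.getD_some]
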